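-- pv_equiv track=rewrite | github.com/govpat/rosalind | problems/pdpl/main.py | solve
-- ===== SOURCE A (Python) =====
-- from collections import Counter
--
-- def max_key(counter):
--     return max(k for k, v in counter.items() if v > 0)
--
-- def can_remove(counter, vals):
--     c = Counter(vals)
--     return all(counter[k] >= v for k, v in c.items())
--
-- def remove_vals(counter, vals):
--     for v in vals:
--         counter[v] -= 1
--
-- def add_vals(counter, vals):
--     for v in vals:
--         counter[v] += 1
--
-- def place(counter, X, width):
--     if sum(counter.values()) == 0:
--         return sorted(X)
--
--     y = max_key(counter)
--     for p in (y, width - y):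
--         if p in X:
--             continue
--         diffs = [abs(p - x) for x in X]
--         if can_remove(counter, diffs):
--             remove_vals(counter, diffs)
--             X.add(p)
--             ans = place(counter, X, width)
--             if ans is not None:
--                 return ans
--             X.remove(p)
--             add_vals(counter, diffs)
--     return None
--
-- def solve(distances):
--     d = [x for x in distances if x > 0]
--     if not d:
--         return [0]
--     width = max(d)
--     counter = Counter(d)
--     X = {0, width}
--     counter[width] -= 1
--     ans = place(counter, X, width)
--     return ans if ans is not None else sorted(X)
-- ===== SOURCE B (Python) =====
-- from collections import Counter
--
-- def _child(counter, X, p):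
--     """Return the successor state after placing p, or None if p cannot be placed."""
--     if p in X:
--         return None
--     diffs = [abs(p - x) for x in X]
--     need = Counter(diffs)
--     if any(counter[k] < v for k, v in need.items()):
--         return None
--     new = counter.copy()
--     for v in diffs:
--         new[v] -= 1
--     return (new, X | {p})
--
-- def solve(distances):
--     d = [x for x in distances if x > 0]
--     if not d:
--         return [0]
--     width = max(d)
--     counter = Counter(d)
--     counter[width] -= 1
--     stack = [(counter, {0, width})]
--     while stack:
--         counter, X = stack.pop()
--         if sum(counter.values()) == 0:
--             return sorted(X)
--         y = max(k for k, v in counter.items() if v > 0)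
--         children = []
--         for p in (y, width - y):
--             st = _child(counter, X, p)
--             if st is not None:
--                 children.append(st)
--         stack.extend(reversed(children))
--     return sorted({0, width})
-- ===== Notes on version B (the rewrite author's own statement) =====
-- stated objective: alternative
-- what changed: The recursive place() with in-place mutate/undo of the counter and point set is replaced by an explicit-stack DFS whose stack holds immutable copied (counter, X) states, children pushed y-branch-first.
import Mathlib
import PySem

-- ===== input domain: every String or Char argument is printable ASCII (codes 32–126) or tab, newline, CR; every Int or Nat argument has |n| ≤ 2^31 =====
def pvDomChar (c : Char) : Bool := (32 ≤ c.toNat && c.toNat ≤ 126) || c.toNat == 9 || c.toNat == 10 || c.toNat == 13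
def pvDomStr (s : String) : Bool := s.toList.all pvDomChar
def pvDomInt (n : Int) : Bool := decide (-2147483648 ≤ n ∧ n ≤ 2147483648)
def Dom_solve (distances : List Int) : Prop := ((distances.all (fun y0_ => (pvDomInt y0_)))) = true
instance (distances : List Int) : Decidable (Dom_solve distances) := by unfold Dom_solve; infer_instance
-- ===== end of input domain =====

-- B replaces A's recursive backtracking (with in-place mutate/undo) by an explicit-stack DFS over
-- copied states, same exploration order; A's mutations are all undone before it returns, so the
-- return value is the whole observable behaviour.

-- ===== PORT A =====
-- max_key(counter): max of the keys with positive count (a helper both Pythons contain verbatim).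
-- Python's max raises on an empty iterable; that never happens at an actual call site (counts are
-- nonnegative and their sum is nonzero there), so the .getD 0 default is unreachable.
def maxKey (c : PySem.Dict Int Int) : Int :=
  (PySem.List.max? (c.items.filterMap (fun kv => if 0 < kv.2 then some kv.1 else none))
    (fun k => k)).getD 0

-- place(counter, X, width): literal transliteration; the state is passed functionally, so A's
-- undo steps (X.remove / add_vals) are the identity and disappear.  The fuel argument only
-- totalizes the Python recursion (each recursive call strictly decreases sum(counter.values()),
-- so the fuel chosen in `solve` is never exhausted on a real run); the sum==0 test comes first,
-- exactly as in Python.  The set-iteration order behind `diffs` only feeds a Counter and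
-- order-independent decrements, so porting through the Set's list order is exact.
def placeA (w : Int) : Nat → PySem.Dict Int Int → PySem.Set Int → Option (List Int)
  | f, c, X =>
    if c.values.sum = 0 then some (PySem.List.sorted X (fun x => x) false)
    else
      match f with
      | 0 => none
      | Nat.succ f' =>
        let y := maxKey c
        let r1 :=
          if X.contains y then none
          else
            let diffs := X.map (fun x => |y - x|)
            if (PySem.Dict.counter diffs).items.all (fun kv => kv.2 ≤ c.getD kv.1 0) then
              placeA w f' (diffs.foldl (fun d v => d.modify v 0 (· - 1)) c) (PySem.Set.add X y)
            else none
        match r1 with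
        | some a => some a
        | none =>
          let p := w - y
          if X.contains p then none
          else
            let diffs := X.map (fun x => |p - x|)
            if (PySem.Dict.counter diffs).items.all (fun kv => kv.2 ≤ c.getD kv.1 0) then
              placeA w f' (diffs.foldl (fun d v => d.modify v 0 (· - 1)) c) (PySem.Set.add X p)
            else none

def solve (distances : List Int) : List Int :=
  let d := distances.filter (fun x => decide (0 < x))
  if d = [] then [0]
  else
    let width := (PySem.List.max? d (fun x => x)).getD 0
    let c0 := (PySem.Dict.counter d).modify width 0 (· - 1)
    let X0 := PySem.Set.ofList [0, width]
    match placeA width (d.length + 1) c0 X0 with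
    | some a => a
    | none => PySem.List.sorted X0 (fun x => x) false

-- ===== PORT B =====
-- _child(counter, X, p): the successor state after placing p, or none if p cannot be placed.
def childB (c : PySem.Dict Int Int) (X : PySem.Set Int) (p : Int) :
    Option (PySem.Dict Int Int × PySem.Set Int) :=
  if X.contains p then none
  else
    let diffs := X.map (fun x => |p - x|)
    if (PySem.Dict.counter diffs).items.any (fun kv => c.getD kv.1 0 < kv.2) then none
    else some (diffs.foldl (fun d v => d.modify v 0 (· - 1)) c, PySem.Set.add X p)

-- the while-loop over the explicit stack; the Lean list's HEAD is the Python stack's TOP, so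
-- `stack.extend(reversed(children))` is `children ++ rest` with children in (y, w-y) order.
-- Each stack entry carries a fuel Nat (children get f-1) that only totalizes the loop; it is
-- never exhausted with the initial fuel chosen in solve_alt.
def dfsB (w : Int) : List (Nat × PySem.Dict Int Int × PySem.Set Int) → List Int
  | [] => PySem.List.sorted (PySem.Set.ofList [0, w]) (fun x => x) false
  | (f, c, X) :: rest =>
    if c.values.sum = 0 then PySem.List.sorted X (fun x => x) false
    else
      match f with
      | 0 => dfsB w rest
      | Nat.succ f' =>
        let y := maxKey c
        dfsB w ((([y, w - y].filterMap (fun p => childB c X p)).map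
          (fun s => (f', s.1, s.2))) ++ rest)
termination_by stack => (stack.map (fun e => 3 ^ e.1)).sum
decreasing_by
  · simp
  · rw [List.map_append, List.sum_append, List.map_map, List.map_cons, List.sum_cons]
    have hb : (List.map ((fun e => 3 ^ e.1) ∘ fun s => (f', s.1, s.2))
        (List.filterMap (fun p => childB c X p) [maxKey c, w - maxKey c])).sum
        ≤ 2 * 3 ^ f' := by
      have h1 : ((fun e : Nat × PySem.Dict Int Int × PySem.Set Int => 3 ^ e.1) ∘
          fun s : PySem.Dict Int Int × PySem.Set Int => (f', s.1, s.2)) = fun _ => 3 ^ f' := rfl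
      rw [h1, List.map_const', List.sum_replicate, smul_eq_mul]
      have hlen : (List.filterMap (fun p => childB c X p) [maxKey c, w - maxKey c]).length ≤ 2 :=
        le_trans (List.length_filterMap_le _ _) (by simp)
      exact Nat.mul_le_mul_right _ hlen
    have hp : 0 < 3 ^ f' := Nat.pow_pos (by norm_num)
    have h3 : (3 : Nat) ^ (f' + 1) = 3 * 3 ^ f' := by rw [pow_succ]; ring
    simp only [Nat.succ_eq_add_one, h3]
    omega

def solve_alt (distances : List Int) : List Int :=
  let d := distances.filter (fun x => decide (0 < x))
  if d = [] then [0]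
  else
    let width := (PySem.List.max? d (fun x => x)).getD 0
    let c0 := (PySem.Dict.counter d).modify width 0 (· - 1)
    dfsB width [(d.length + 1, c0, PySem.Set.ofList [0, width])]

-- ===== PRECONDITION & SPEC =====
def Spec_solve (distances : List Int) (out : List Int) : Prop := out = solve_alt distances
instance (distances : List Int) (out : List Int) : Decidable (Spec_solve distances out) := by unfold Spec_solve; infer_instance

-- ===== CLAIM (what is proved, stated in full; the proofs are below) =====
def Claim_equal_solve : Prop := ∀ (distances : List Int), Dom_solve distances → Spec_solve distances (solve distances)

-- ===== LEMMAS AND PROOFS =====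

-- B's pruning test `any(counter[k] < v)` is the negation of A's `all(counter[k] >= v)`.
theorem any_lt_eq_not_all_le (c : PySem.Dict Int Int) (l : List (Int × Int)) :
    (l.any (fun kv => c.getD kv.1 0 < kv.2)) = !(l.all (fun kv => kv.2 ≤ c.getD kv.1 0)) := by
  induction l with
  | nil => rfl
  | cons a t ih =>
    have h : (decide (c.getD a.1 0 < a.2)) = !decide (a.2 ≤ c.getD a.1 0) := by
      by_cases hh : a.2 ≤ c.getD a.1 0
      · simp [hh]
      · simp [hh]
        omega
    simp [List.any_cons, List.all_cons, ih, h]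

-- A's inline attempt at point p, phrased through B's _child.
theorem att_eq (w : Int) (f' : Nat) (c : PySem.Dict Int Int) (X : PySem.Set Int) (p : Int) :
    (if X.contains p then none
     else
       if ((PySem.Dict.counter (X.map (fun x => |p - x|))).items.all
            (fun kv => kv.2 ≤ c.getD kv.1 0)) then
         placeA w f' ((X.map (fun x => |p - x|)).foldl (fun d v => d.modify v 0 (· - 1)) c)
           (PySem.Set.add X p)
       else none)
    = Option.elim (childB c X p) none (fun s => placeA w f' s.1 s.2) := by
  simp only [childB, any_lt_eq_not_all_le]
  by_cases hX : p ∈ X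
  · simp [hX]
  · cases hall : ((PySem.Dict.counter (X.map (fun x => |p - x|))).items.all
        (fun kv => kv.2 ≤ c.getD kv.1 0))
    · simp [hX]
    · simp [hX, hall]

-- the stack DFS started at (f,c,X) on top of rest is: run the recursive search on (f,c,X);
-- on failure continue with rest.
theorem bridge (w : Int) (f : Nat) :
    ∀ (c : PySem.Dict Int Int) (X : PySem.Set Int)
      (rest : List (Nat × PySem.Dict Int Int × PySem.Set Int)),
      dfsB w ((f, c, X) :: rest) =
        (match placeA w f c X with
         | some a => a
         | none => dfsB w rest) := by
  induction f with
  | zero =>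
    intro c X rest
    rw [dfsB, placeA]
    by_cases h : c.values.sum = 0
    · simp [h]
    · simp [h]
  | succ f' ih =>
    intro c X rest
    rw [dfsB, placeA]
    by_cases h : c.values.sum = 0
    · simp [h]
    · simp only [h, if_false, att_eq]
      rcases h1 : childB c X (maxKey c) with _ | ⟨c1, X1⟩ <;>
        rcases h2 : childB c X (w - maxKey c) with _ | ⟨c2, X2⟩ <;>
          simp only [h1, h2, Option.elim, List.filterMap_cons, List.filterMap_nil,
            List.map_cons, List.map_nil, List.cons_append, List.nil_append]
      · exact ih c2 X2 rest
      · rw [ih]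
        cases placeA w f' c1 X1 <;> rfl
      · rw [ih, ih]
        cases placeA w f' c1 X1 <;> rfl

-- ===== VERDICT (by name: the statement is the Claim_ definition above) =====
theorem solve_spec : Claim_equal_solve := by
  intro distances _
  unfold Spec_solve solve solve_alt
  by_cases hd : distances.filter (fun x => decide (0 < x)) = []
  · simp [hd]
  · simp only [hd, if_false]
    rw [bridge]
    cases placeA ((PySem.List.max? (distances.filter (fun x => decide (0 < x))) (fun x => x)).getD 0)
        ((distances.filter (fun x => decide (0 < x))).length + 1)
        ((PySem.Dict.counter (distances.filter (fun x => decide (0 < x)))).modify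
          ((PySem.List.max? (distances.filter (fun x => decide (0 < x))) (fun x => x)).getD 0) 0 (· - 1))
        (PySem.Set.ofList [0, (PySem.List.max? (distances.filter (fun x => decide (0 < x))) (fun x => x)).getD 0]) <;>
      simp [dfsB]
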